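-- pv_equiv track=rewrite | github.com/OxQuasar/nous-memories | iching/relations/odd_char_rigidity.py | compute_fiber_sizes
-- ===== SOURCE A (Python) =====
-- from collections import Counter, defaultdict
--
-- def compute_fiber_sizes(assignment, dom_pairs, q, n, p):
--     """Compute fiber sizes of the surjection."""
--     fibers = Counter()
--     fibers[0] += 1  # the zero element always maps to 0
--     for i, (rep, partner) in enumerate(dom_pairs):
--         val = assignment[i]
--         neg_val = (-val) % p
--         fibers[val] += 1
--         if partner != rep:
--             fibers[neg_val] += 1
--     return tuple(sorted(fibers.values(), reverse=True))
-- ===== SOURCE B (Python) =====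
-- def compute_fiber_sizes(assignment, dom_pairs, q, n, p):
--     """Compute fiber sizes of the surjection: collect all target values,
--     then sort-and-scan runs of equal values instead of hash counting."""
--     targets = [0]  # the zero element always maps to 0
--     for i, (rep, partner) in enumerate(dom_pairs):
--         val = assignment[i]
--         targets.append(val)
--         if partner != rep:
--             targets.append((-val) % p)
--     targets.sort()
--     sizes = []
--     rest = targets
--     while rest:
--         x = rest[0]
--         cnt = 1
--         while cnt < len(rest) and rest[cnt] == x:
--             cnt += 1
--         sizes.append(cnt)
--         rest = rest[cnt:]
--     return tuple(sorted(sizes, reverse=True))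
-- ===== Notes on version B (the rewrite author's own statement) =====
-- stated objective: alternative
-- what changed: Replaces Counter-based hash frequency counting with building the flat multiset of target values, sorting it once, and scanning runs of equal values to obtain the fiber sizes.
import Mathlib
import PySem

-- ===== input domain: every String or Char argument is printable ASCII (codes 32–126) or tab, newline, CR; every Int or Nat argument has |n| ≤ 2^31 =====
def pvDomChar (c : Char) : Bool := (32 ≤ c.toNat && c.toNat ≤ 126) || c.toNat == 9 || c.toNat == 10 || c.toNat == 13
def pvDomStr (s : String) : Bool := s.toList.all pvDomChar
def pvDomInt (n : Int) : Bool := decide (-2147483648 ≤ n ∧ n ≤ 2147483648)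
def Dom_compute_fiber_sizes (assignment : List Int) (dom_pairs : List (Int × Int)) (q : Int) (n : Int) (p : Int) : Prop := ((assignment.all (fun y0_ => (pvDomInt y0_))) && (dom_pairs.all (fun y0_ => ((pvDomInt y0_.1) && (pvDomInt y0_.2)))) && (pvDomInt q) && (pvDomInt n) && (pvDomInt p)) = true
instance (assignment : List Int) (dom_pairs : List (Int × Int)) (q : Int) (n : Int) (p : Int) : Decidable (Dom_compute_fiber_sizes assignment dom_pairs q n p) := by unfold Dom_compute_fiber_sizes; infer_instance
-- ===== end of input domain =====

-- B replaces Counter-based hash counting by building the flat list of target values,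
-- sorting it once and scanning runs of equal values (alternative algorithm, same cost class).

-- ===== PORT A =====
def compute_fiber_sizes (assignment : List Int) (dom_pairs : List (Int × Int)) (q : Int) (n : Int) (p : Int) : List Int :=
  let fibers : PySem.Dict Int Int := PySem.Dict.empty.modify 0 0 (· + 1)
  let fibers := (PySem.List.enumerate dom_pairs).foldl (fun d ip =>
    let val := PySem.List.pyGetD assignment ip.1 0
    let neg_val := PySem.Int.mod (-val) p
    let d := d.modify val 0 (· + 1)
    if ip.2.2 ≠ ip.2.1 then d.modify neg_val 0 (· + 1) else d) fibers
  PySem.List.sorted fibers.values (fun x => x) true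

-- ===== PORT B =====
-- the flat list of target values: [0], then assignment[i] and, when partner ≠ rep, (-assignment[i]) % p
def fsTargets (assignment : List Int) (dom_pairs : List (Int × Int)) (p : Int) : List Int :=
  (PySem.List.enumerate dom_pairs).foldl (fun ts ip =>
    let val := PySem.List.pyGetD assignment ip.1 0
    let ts := ts ++ [val]
    if ip.2.2 ≠ ip.2.1 then ts ++ [PySem.Int.mod (-val) p] else ts) [0]

-- run-length scan: length of each maximal run of equal adjacent values
def runLengths : List Int → List Int
  | [] => []
  | x :: xs =>
    ((xs.takeWhile (· == x)).length + 1 : Int) :: runLengths (xs.dropWhile (· == x))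
  termination_by l => l.length
  decreasing_by
    simpa using Nat.lt_succ_of_le (List.Sublist.length_le (List.dropWhile_sublist (· == x)))

def compute_fiber_sizes_alt (assignment : List Int) (dom_pairs : List (Int × Int)) (q : Int) (n : Int) (p : Int) : List Int :=
  let targets := PySem.List.sorted (fsTargets assignment dom_pairs p) (fun x => x) false
  PySem.List.sorted (runLengths targets) (fun x => x) true

-- ===== PRECONDITION & SPEC =====
-- Pre_ excludes exactly the inputs where A raises: IndexError when dom_pairs is longer than
-- assignment, ZeroDivisionError when p = 0 and the loop body runs at least once.
def Pre_compute_fiber_sizes (assignment : List Int) (dom_pairs : List (Int × Int)) (q : Int) (n : Int) (p : Int) : Prop :=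
  dom_pairs.length ≤ assignment.length ∧ (dom_pairs = [] ∨ p ≠ 0)
instance (assignment : List Int) (dom_pairs : List (Int × Int)) (q : Int) (n : Int) (p : Int) : Decidable (Pre_compute_fiber_sizes assignment dom_pairs q n p) := by unfold Pre_compute_fiber_sizes; infer_instance

def pvWitness_compute_fiber_sizes : List Int × (List (Int × Int)) × Int × Int × Int :=
  ([1, 2], [(0, 1), (2, 2)], 0, 0, 5)

def Spec_compute_fiber_sizes (assignment : List Int) (dom_pairs : List (Int × Int)) (q : Int) (n : Int) (p : Int) (out : List Int) : Prop := out = compute_fiber_sizes_alt assignment dom_pairs q n p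
instance (assignment : List Int) (dom_pairs : List (Int × Int)) (q : Int) (n : Int) (p : Int) (out : List Int) : Decidable (Spec_compute_fiber_sizes assignment dom_pairs q n p out) := by unfold Spec_compute_fiber_sizes; infer_instance

-- ===== CLAIM (what is proved, stated in full; the proofs are below) =====
def Claim_equal_compute_fiber_sizes : Prop := ∀ (assignment : List Int) (dom_pairs : List (Int × Int)) (q : Int) (n : Int) (p : Int), Dom_compute_fiber_sizes assignment dom_pairs q n p → Pre_compute_fiber_sizes assignment dom_pairs q n p → Spec_compute_fiber_sizes assignment dom_pairs q n p (compute_fiber_sizes assignment dom_pairs q n p)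

-- ===== LEMMAS AND PROOFS =====

-- folding over a flatMap is the nested fold
theorem pv_foldl_flatMap {α β γ : Type} (g : α → List β) (step : γ → β → γ) :
    ∀ (l : List α) (d : γ), (l.flatMap g).foldl step d = l.foldl (fun d x => (g x).foldl step d) d := by
  intro l
  induction l with
  | nil => intro d; simp
  | cons x xs ih => intro d; simp [List.foldl_append, ih]

-- the target list is [0] ++ a flatMap over the enumerated pairs
theorem fsTargets_eq_flatMap (assignment : List Int) (dom_pairs : List (Int × Int)) (p : Int) :
    fsTargets assignment dom_pairs p =
      [0] ++ (PySem.List.enumerate dom_pairs).flatMap (fun ip =>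
        if ip.2.2 ≠ ip.2.1 then
          [PySem.List.pyGetD assignment ip.1 0,
           PySem.Int.mod (-(PySem.List.pyGetD assignment ip.1 0)) p]
        else [PySem.List.pyGetD assignment ip.1 0]) := by
  simp only [fsTargets]
  rw [show (fun (ts : List Int) (ip : Int × (Int × Int)) =>
        if ip.2.2 ≠ ip.2.1 then
          (ts ++ [PySem.List.pyGetD assignment ip.1 0]) ++
            [PySem.Int.mod (-(PySem.List.pyGetD assignment ip.1 0)) p]
        else ts ++ [PySem.List.pyGetD assignment ip.1 0]) =
      (fun (ts : List Int) (ip : Int × (Int × Int)) => ts ++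
        (if ip.2.2 ≠ ip.2.1 then
          [PySem.List.pyGetD assignment ip.1 0,
           PySem.Int.mod (-(PySem.List.pyGetD assignment ip.1 0)) p]
        else [PySem.List.pyGetD assignment ip.1 0])) from by
    funext ts ip; by_cases h : ip.2.2 = ip.2.1 <;> simp [h]]
  exact PySem.List.foldl_append_eq_flatMap _ _ _

-- A's Counter loop builds exactly Counter(targets)
theorem fibers_eq_counter (assignment : List Int) (dom_pairs : List (Int × Int)) (p : Int) :
    (PySem.List.enumerate dom_pairs).foldl (fun d ip =>
      if ip.2.2 ≠ ip.2.1 then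
        ((d : PySem.Dict Int Int).modify (PySem.List.pyGetD assignment ip.1 0) 0 (· + 1)).modify
          (PySem.Int.mod (-(PySem.List.pyGetD assignment ip.1 0)) p) 0 (· + 1)
      else d.modify (PySem.List.pyGetD assignment ip.1 0) 0 (· + 1))
      (PySem.Dict.empty.modify 0 0 (· + 1)) =
    PySem.Dict.counter (fsTargets assignment dom_pairs p) := by
  rw [PySem.Dict.counter_eq_foldl, fsTargets_eq_flatMap, List.foldl_append, pv_foldl_flatMap]
  simp only [List.foldl_cons, List.foldl_nil]
  apply PySem.List.foldl_congr_mem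
  intro d ip _
  by_cases h : ip.2.2 = ip.2.1 <;> simp [h]

-- folding Set.add over elements already present changes nothing
theorem pv_foldl_add_mem {α : Type} [BEq α] [LawfulBEq α] :
    ∀ (l s : List α), (∀ y ∈ l, y ∈ s) → List.foldl PySem.Set.add s l = s := by
  intro l
  induction l with
  | nil => intro s _; rfl
  | cons y l ih =>
    intro s h
    rw [List.foldl_cons]
    have hy : PySem.Set.add s y = s := by
      simp [PySem.Set.add, PySem.Set.contains, h y (by simp)]
    rw [hy]
    exact ih s (fun z hz => h z (List.mem_cons_of_mem _ hz))

-- folding Set.add past a distinct head commutes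
theorem pv_foldl_add_cons {α : Type} [BEq α] [LawfulBEq α] :
    ∀ (l : List α) (x : α) (s : List α), x ∉ l →
      List.foldl PySem.Set.add (x :: s) l = x :: List.foldl PySem.Set.add s l := by
  intro l
  induction l with
  | nil => intro x s _; rfl
  | cons y l ih =>
    intro x s hx
    have hyx : y ≠ x := by intro h; exact hx (by simp [h])
    rw [List.foldl_cons, List.foldl_cons]
    have hadd : PySem.Set.add (x :: s) y = x :: PySem.Set.add s y := by
      simp [PySem.Set.add, PySem.Set.contains, hyx]
      split <;> rfl
    rw [hadd]
    exact ih x _ (fun h => hx (List.mem_cons_of_mem _ h))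

-- runLengths of a ≤-sorted list lists, per distinct value in order, its multiplicity
theorem runLengths_sorted_eq :
    ∀ (N : Nat) (l : List Int), l.length ≤ N → l.Pairwise (· ≤ ·) →
      runLengths l = (PySem.Set.ofList l).map (fun k => (List.count k l : Int)) := by
  intro N
  induction N with
  | zero =>
    intro l hlen _
    cases l with
    | nil => simp [runLengths, PySem.Set.ofList_eq_foldl]
    | cons x xs => simp at hlen
  | succ N ih =>
    intro l hlen hpw
    cases l with
    | nil => simp [runLengths, PySem.Set.ofList_eq_foldl]
    | cons x xs =>
      have hpw' : xs.Pairwise (· ≤ ·) := (List.pairwise_cons.mp hpw).2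
      have hxle : ∀ y ∈ xs, x ≤ y := (List.pairwise_cons.mp hpw).1
      have htx : ∀ y ∈ xs.takeWhile (· == x), y = x := by
        intro y hy
        simpa using List.mem_takeWhile_imp hy
      have hxd : x ∉ xs.dropWhile (· == x) := by
        intro hxmem
        have hne : xs.dropWhile (· == x) ≠ [] := by
          intro h0; rw [h0] at hxmem; cases hxmem
        have hhead := List.head_dropWhile_not (· == x) (l := xs) hne
        have hdpw : (xs.dropWhile (· == x)).Pairwise (· ≤ ·) :=
          List.Pairwise.sublist (List.dropWhile_sublist _) hpw'
        cases hcons : xs.dropWhile (· == x) with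
        | nil => exact hne hcons
        | cons y d' =>
          have hyx : y ≠ x := by
            simp only [hcons, List.head_cons] at hhead
            simpa using hhead
          rw [hcons] at hxmem
          cases List.mem_cons.mp hxmem with
          | inl h => exact hyx h.symm
          | inr h =>
            have hyle : y ≤ x := by
              rw [hcons] at hdpw
              exact (List.pairwise_cons.mp hdpw).1 x h
            have hxy : x ≤ y := by
              apply hxle
              exact (List.dropWhile_sublist (· == x)).subset (by simp [hcons])
            exact hyx (le_antisymm hyle hxy)
      have hcount_xs : List.count x xs = (xs.takeWhile (· == x)).length := by
        conv_lhs => rw [← List.takeWhile_append_dropWhile (p := (· == x)) (l := xs)]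
        rw [List.count_append]
        have h1 : List.count x (xs.takeWhile (· == x)) = (xs.takeWhile (· == x)).length :=
          List.count_eq_length.mpr (fun b hb => (htx b hb).symm)
        have h2 : List.count x (xs.dropWhile (· == x)) = 0 := List.count_eq_zero.mpr hxd
        omega
      have hofList : PySem.Set.ofList (x :: xs) =
          x :: PySem.Set.ofList (xs.dropWhile (· == x)) := by
        rw [PySem.Set.ofList_eq_foldl, PySem.Set.ofList_eq_foldl, List.foldl_cons]
        have hadd0 : PySem.Set.add ([] : List Int) x = [x] := by simp [PySem.Set.add]
        rw [hadd0]
        conv_lhs => rw [← List.takeWhile_append_dropWhile (p := (· == x)) (l := xs)]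
        rw [List.foldl_append]
        rw [pv_foldl_add_mem (xs.takeWhile (· == x)) [x] (fun y hy => by simp [htx y hy])]
        exact pv_foldl_add_cons _ _ _ hxd
      have hrl : runLengths (x :: xs) =
          ((xs.takeWhile (· == x)).length + 1 : Int) :: runLengths (xs.dropWhile (· == x)) := by
        simp only [runLengths]
      have hih : runLengths (xs.dropWhile (· == x)) =
          (PySem.Set.ofList (xs.dropWhile (· == x))).map
            (fun k => (List.count k (xs.dropWhile (· == x)) : Int)) := by
        apply ih
        · have hsub := List.Sublist.length_le (List.dropWhile_sublist (l := xs) (· == x))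
          simp at hlen
          omega
        · exact List.Pairwise.sublist (List.dropWhile_sublist _) hpw'
      rw [hrl, hih, hofList, List.map_cons]
      congr 1
      · have hcnt : List.count x (x :: xs) = (xs.takeWhile (· == x)).length + 1 := by
          rw [List.count_cons_self, hcount_xs]
        rw [hcnt]
        push_cast
        ring
      · apply List.map_congr_left
        intro k hk
        have hkd : k ∈ xs.dropWhile (· == x) := (PySem.Set.mem_ofList _ _).mp hk
        have hkx : k ≠ x := fun h => hxd (h ▸ hkd)
        have hkt : List.count k (xs.takeWhile (· == x)) = 0 :=
          List.count_eq_zero.mpr (fun hmem => hkx (htx k hmem))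
        have hc : List.count k (x :: xs) = List.count k (xs.dropWhile (· == x)) := by
          rw [List.count_cons_of_ne (Ne.symm hkx)]
          conv_lhs => rw [← List.takeWhile_append_dropWhile (p := (· == x)) (l := xs)]
          rw [List.count_append, hkt]
          omega
        rw [hc]

-- the two count lists are permutations of one another
theorem counts_perm (ts : List Int) :
    (runLengths (PySem.List.sorted ts (fun x => x) false)).Perm
      ((PySem.Dict.counter ts).values) := by
  have hpw : (PySem.List.sorted ts (fun x => x) false).Pairwise (· ≤ ·) :=
    PySem.List.sorted_pairwise ts (fun x => x)
  rw [runLengths_sorted_eq (PySem.List.sorted ts (fun x => x) false).length _ le_rfl hpw]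
  have hvals : (PySem.Dict.counter ts).values =
      (PySem.Set.ofList ts).map (fun k => (List.count k ts : Int)) := by
    simp only [PySem.Dict.values, PySem.Dict.items_counter, List.map_map]
    rfl
  rw [hvals]
  have hfun : (fun k => (List.count k (PySem.List.sorted ts (fun x => x) false) : Int)) =
      (fun k => (List.count k ts : Int)) := by
    funext k
    rw [(PySem.List.sorted_perm ts (fun x => x) false).count_eq k]
  rw [hfun]
  apply List.Perm.map
  rw [List.perm_ext_iff_of_nodup (PySem.Set.nodup_ofList _) (PySem.Set.nodup_ofList _)]
  intro a
  rw [PySem.Set.mem_ofList, PySem.Set.mem_ofList]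
  exact (PySem.List.sorted_perm ts (fun x => x) false).mem_iff

-- sorted-descending lists of Int that are permutations are equal
theorem sorted_rev_eq_of_perm {a b : List Int} (h : a.Perm b) :
    PySem.List.sorted a (fun x => x) true = PySem.List.sorted b (fun x => x) true := by
  apply PySem.List.eq_of_perm_of_pairwise_le_of_injective (fun x : Int => -x) neg_injective
  · exact ((PySem.List.sorted_perm a _ _).trans h).trans (PySem.List.sorted_perm b _ _).symm
  · exact (PySem.List.sorted_pairwise_rev a (fun x => x)).imp (fun h => neg_le_neg h)
  · exact (PySem.List.sorted_pairwise_rev b (fun x => x)).imp (fun h => neg_le_neg h)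

-- ===== VERDICT (by name: the statement is the Claim_ definition above) =====
theorem compute_fiber_sizes_spec : Claim_equal_compute_fiber_sizes := by
  intro assignment dom_pairs q n p _ _
  unfold Spec_compute_fiber_sizes
  simp only [compute_fiber_sizes, compute_fiber_sizes_alt]
  rw [fibers_eq_counter assignment dom_pairs p]
  exact (sorted_rev_eq_of_perm (counts_perm (fsTargets assignment dom_pairs p))).symm
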